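-- pv_equiv track=rewrite | github.com/ofircohen205/dcn-simulators | netbench/mlu_lb/topologies_generator/links_generator.py | build_tor_core_links
-- ===== SOURCE A (Python) =====
-- from typing import Tuple, List
--
-- def build_tor_core_links(
--     min_tor_id: int,
--     max_tor_id: int,
--     min_core_id: int,
--     max_core_id: int,
-- ) -> Tuple[List[Tuple[int, int]], List[Tuple[int, int]]]:
--     tors = list(range(min_tor_id, max_tor_id + 1))
--     cores = list(range(min_core_id, max_core_id + 1))
--
--     uplinks, downlinks = [], []
--     for tor in tors:
--         for core in cores:
--             uplinks.append((tor, core))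
--             downlinks.append((core, tor))
--     return uplinks, downlinks
-- ===== SOURCE B (Python) =====
-- def build_tor_core_links(min_tor_id, max_tor_id, min_core_id, max_core_id):
--     # flat-index enumeration: decode each k in [0, n*m) with divmod instead of nested loops
--     n = max(0, max_tor_id - min_tor_id + 1)
--     m = max(0, max_core_id - min_core_id + 1)
--     uplinks = [(min_tor_id + k // m, min_core_id + k % m) for k in range(n * m)]
--     downlinks = [(c, t) for (t, c) in uplinks]
--     return uplinks, downlinks
-- ===== Notes on version B (the rewrite author's own statement) =====
-- stated objective: alternative
-- what changed: Replaces the nested tor/core double loop with a single flat-index pass over range(n*m) that decodes each index into (tor, core) by divmod, plus a second pass swapping pairs to get downlinks.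
import Mathlib
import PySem

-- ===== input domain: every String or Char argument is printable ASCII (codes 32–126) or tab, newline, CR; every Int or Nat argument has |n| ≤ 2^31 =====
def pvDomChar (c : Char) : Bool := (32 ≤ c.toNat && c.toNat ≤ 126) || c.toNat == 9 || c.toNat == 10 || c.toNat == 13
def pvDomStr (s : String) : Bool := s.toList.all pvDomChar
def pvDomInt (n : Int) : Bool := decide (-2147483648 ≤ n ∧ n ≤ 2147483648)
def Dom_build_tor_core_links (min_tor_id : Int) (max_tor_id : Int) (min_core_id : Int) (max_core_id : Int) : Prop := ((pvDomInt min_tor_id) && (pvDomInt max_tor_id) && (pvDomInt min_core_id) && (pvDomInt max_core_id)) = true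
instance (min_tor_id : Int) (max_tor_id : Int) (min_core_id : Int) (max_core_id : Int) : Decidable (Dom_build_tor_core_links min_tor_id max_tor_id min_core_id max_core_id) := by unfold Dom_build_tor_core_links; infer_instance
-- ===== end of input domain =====

-- B enumerates one flat index range(n*m) decoded into (tor, core) by divmod, then
-- swaps pairs for downlinks (alternative algorithm to A's nested loops, same cost).


-- ===== PORT A =====
-- interleaved double loop appending to both accumulators
def build_tor_core_links (min_tor_id : Int) (max_tor_id : Int) (min_core_id : Int) (max_core_id : Int) : (List (Int × Int)) × (List (Int × Int)) :=
  let tors := PySem.List.pyRange min_tor_id (max_tor_id + 1) 1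
  let cores := PySem.List.pyRange min_core_id (max_core_id + 1) 1
  tors.foldl (fun st tor =>
    cores.foldl (fun st core =>
      (st.1 ++ [(tor, core)], st.2 ++ [(core, tor)])) st) (([], []) : (List (Int × Int)) × (List (Int × Int)))

-- ===== PORT B =====
-- single flat index k ∈ range(n*m), decoded by floor-division / mod; downlinks by swapping
def build_tor_core_links_alt (min_tor_id : Int) (max_tor_id : Int) (min_core_id : Int) (max_core_id : Int) : (List (Int × Int)) × (List (Int × Int)) :=
  let n := max 0 (max_tor_id - min_tor_id + 1)
  let m := max 0 (max_core_id - min_core_id + 1)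
  let uplinks := (PySem.List.pyRange 0 (n * m) 1).map
    (fun k => (min_tor_id + PySem.Int.floordiv k m, min_core_id + PySem.Int.mod k m))
  let downlinks := uplinks.map (fun p => (p.2, p.1))
  (uplinks, downlinks)

-- ===== PRECONDITION & SPEC =====
def Spec_build_tor_core_links (min_tor_id : Int) (max_tor_id : Int) (min_core_id : Int) (max_core_id : Int) (out : (List (Int × Int)) × (List (Int × Int))) : Prop := out = build_tor_core_links_alt min_tor_id max_tor_id min_core_id max_core_id
instance (min_tor_id : Int) (max_tor_id : Int) (min_core_id : Int) (max_core_id : Int) (out : (List (Int × Int)) × (List (Int × Int))) : Decidable (Spec_build_tor_core_links min_tor_id max_tor_id min_core_id max_core_id out) := by unfold Spec_build_tor_core_links; infer_instance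

-- ===== CLAIM (what is proved, stated in full; the proofs are below) =====
def Claim_equal_build_tor_core_links : Prop := ∀ (min_tor_id : Int) (max_tor_id : Int) (min_core_id : Int) (max_core_id : Int), Dom_build_tor_core_links min_tor_id max_tor_id min_core_id max_core_id → Spec_build_tor_core_links min_tor_id max_tor_id min_core_id max_core_id (build_tor_core_links min_tor_id max_tor_id min_core_id max_core_id)

-- ===== LEMMAS AND PROOFS =====
theorem inner_loop (cores : List Int) (tor : Int) (st : (List (Int × Int)) × (List (Int × Int))) :
    cores.foldl (fun st core => (st.1 ++ [(tor, core)], st.2 ++ [(core, tor)])) st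
      = (st.1 ++ cores.map (fun core => (tor, core)), st.2 ++ cores.map (fun core => (core, tor))) := by
  induction cores generalizing st with
  | nil => simp
  | cons c cs ih => simp [ih]

theorem outer_loop (tors cores : List Int) (st : (List (Int × Int)) × (List (Int × Int))) :
    tors.foldl (fun st tor =>
      cores.foldl (fun st core => (st.1 ++ [(tor, core)], st.2 ++ [(core, tor)])) st) st
      = (st.1 ++ tors.flatMap (fun tor => cores.map (fun core => (tor, core))),
         st.2 ++ tors.flatMap (fun tor => cores.map (fun core => (core, tor)))) := by
  induction tors generalizing st with
  | nil => simp
  | cons t ts ih => rw [List.foldl_cons, inner_loop, ih]; simp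

-- nested product enumeration = flat-index divmod enumeration (over Nat)
theorem prod_divmod {α : Type} (n m : Nat) (f : Nat → Nat → α) :
    (List.range n).flatMap (fun i => (List.range m).map (f i))
      = (List.range (n * m)).map (fun k => f (k / m) (k % m)) := by
  rcases Nat.eq_zero_or_pos m with hm | hm
  · subst hm; simp
  · induction n with
    | zero => simp
    | succ n ih =>
      rw [List.range_succ, List.flatMap_append, ih, Nat.succ_mul, List.range_add,
          List.map_append, List.map_map]
      congr 1
      simp only [List.flatMap_cons, List.flatMap_nil, List.append_nil]
      apply List.map_congr_left
      intro j hj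
      have hjm : j < m := List.mem_range.mp hj
      have h1 : (n * m + j) / m = n := by
        rw [Nat.mul_comm, Nat.mul_add_div hm, Nat.div_eq_of_lt hjm]; omega
      have h2 : (n * m + j) % m = j := by
        rw [Nat.mul_comm, Nat.mul_add_mod, Nat.mod_eq_of_lt hjm]
      simp [h1, h2]

theorem uplinks_eq (a c : Int) (N M : Nat) :
    ((List.range N).map (fun (k : Nat) => a + (k:Int))).flatMap
        (fun t => ((List.range M).map (fun (k : Nat) => c + (k:Int))).map (fun co => ((t, co) : Int × Int)))
      = ((List.range (N*M)).map (fun (k : Nat) => ((k:Int)))).map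
        (fun k => (a + PySem.Int.floordiv k (M:Int), c + PySem.Int.mod k (M:Int))) := by
  rw [List.flatMap_map, List.map_map]
  have := prod_divmod N M (fun i j => ((a + (i:Int), c + (j:Int)) : Int × Int))
  simp only [Function.comp_def, List.map_map] at this ⊢
  rw [this]
  apply List.map_congr_left
  intro k _
  simp

theorem downlinks_eq (a c : Int) (N M : Nat) :
    ((List.range N).map (fun (k : Nat) => a + (k:Int))).flatMap
        (fun t => ((List.range M).map (fun (k : Nat) => c + (k:Int))).map (fun co => ((co, t) : Int × Int)))
      = (((List.range (N*M)).map (fun (k : Nat) => ((k:Int)))).map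
        (fun k => ((a + PySem.Int.floordiv k (M:Int), c + PySem.Int.mod k (M:Int)) : Int × Int))).map
        (fun p => (p.2, p.1)) := by
  rw [List.flatMap_map, List.map_map, List.map_map]
  have := prod_divmod N M (fun i j => ((c + (j:Int), a + (i:Int)) : Int × Int))
  simp only [Function.comp_def, List.map_map] at this ⊢
  rw [this]
  apply List.map_congr_left
  intro k _
  simp

-- ===== VERDICT (by name: the statement is the Claim_ definition above) =====
theorem build_tor_core_links_spec : Claim_equal_build_tor_core_links := by
  intro a b c d _
  unfold Spec_build_tor_core_links build_tor_core_links build_tor_core_links_alt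
  rw [outer_loop]
  have hn : max 0 (b - a + 1) = (((b - a + 1).toNat : Nat) : Int) := by omega
  have hm : max 0 (d - c + 1) = (((d - c + 1).toNat : Nat) : Int) := by omega
  have htors : PySem.List.pyRange a (b + 1) 1
      = (List.range ((b - a + 1).toNat)).map (fun (k : Nat) => a + (k:Int)) := by
    rw [PySem.List.pyRange_one, show b + 1 - a = b - a + 1 from by ring]
  have hcores : PySem.List.pyRange c (d + 1) 1
      = (List.range ((d - c + 1).toNat)).map (fun (k : Nat) => c + (k:Int)) := by
    rw [PySem.List.pyRange_one, show d + 1 - c = d - c + 1 from by ring]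
  have hflat : PySem.List.pyRange 0 ((max 0 (b - a + 1)) * (max 0 (d - c + 1))) 1
      = (List.range ((b - a + 1).toNat * (d - c + 1).toNat)).map (fun (k : Nat) => ((k:Int))) := by
    rw [PySem.List.pyRange_one, hn, hm, ← Nat.cast_mul, sub_zero, Int.toNat_natCast]
    simp
  simp only [htors, hcores, hflat, List.nil_append]
  simp only [hm]
  refine Prod.ext ?_ ?_
  · simpa using uplinks_eq a c (b - a + 1).toNat (d - c + 1).toNat
  · simpa using downlinks_eq a c (b - a + 1).toNat (d - c + 1).toNat
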